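-- pv_equiv track=rewrite | github.com/anttonal/first-projects | projects_on_the_go/Project.py | ok_format
-- ===== SOURCE A (Python) =====
-- def ok_format(xy):
--     """
--     Checks if the coordinates entered by the user are in the right format.
--     :param xy: str, the coordinates entered by the user.
--     :return: bool - tells if the coordinates are okay.
--     """
--
--     ok_letters = "abcdefghij"
--     ok_numbers = "0123456789"
--     checks_out = []
--
--     try:
--         for coordinates in xy:
--             checks_out.append(len(coordinates) == 2)
--             checks_out.append(coordinates[0].lower() in ok_letters)
--             checks_out.append(coordinates[1] in ok_numbers)
--
--         if False in checks_out:
--             return False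
--
--         else:
--             return True
--
--     except IndexError:
--         return False
-- ===== SOURCE B (Python) =====
-- import re
--
-- _COORD = re.compile(r"[a-jA-J][0-9]")
--
--
-- def ok_format(xy):
--     """
--     Checks if the coordinates entered by the user are in the right format.
--     :param xy: iterable of str, the coordinates entered by the user.
--     :return: bool - tells if the coordinates are okay.
--     """
--     return all(_COORD.fullmatch(c) is not None for c in xy)
-- ===== Notes on version B (the rewrite author's own statement) =====
-- stated objective: idiomatic
-- what changed: Replaces the hand-written per-coordinate length/index checks, the accumulated list of booleans and the try/except IndexError control flow with a single compiled regular expression [a-jA-J][0-9] fullmatch under all().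
import Mathlib
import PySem

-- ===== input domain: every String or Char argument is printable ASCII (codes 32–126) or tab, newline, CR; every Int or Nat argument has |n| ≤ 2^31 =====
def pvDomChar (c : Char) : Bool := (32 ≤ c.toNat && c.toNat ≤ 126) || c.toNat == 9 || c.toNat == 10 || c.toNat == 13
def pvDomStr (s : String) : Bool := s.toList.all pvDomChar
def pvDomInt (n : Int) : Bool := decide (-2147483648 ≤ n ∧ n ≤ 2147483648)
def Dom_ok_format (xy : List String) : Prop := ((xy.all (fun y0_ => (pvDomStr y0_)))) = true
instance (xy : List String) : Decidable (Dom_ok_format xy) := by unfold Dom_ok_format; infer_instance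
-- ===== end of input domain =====

-- B replaces A's hand-written length/index checks, accumulated boolean list and
-- try/except IndexError with a single regex fullmatch [a-jA-J][0-9] under all().

-- ===== PORT A =====
-- the 'for' loop of A: builds checks_out; 'none' = an IndexError was raised
def ok_format_loop : List String → List Bool → Option (List Bool)
  | [], acc => some acc
  | c :: rest, acc =>
    let b1 := decide (PySem.Str.len c = 2)                      -- len(coordinates) == 2
    match PySem.Str.pyGet? c 0 with                             -- coordinates[0] (IndexError → none)
    | none => none
    | some c0 =>
      -- coordinates[0].lower() in ok_letters  (substring test on a 1-char string)
      let b2 := PySem.Str.isIn (String.ofList (PySem.Chars.lower [c0])) "abcdefghij"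
      match PySem.Str.pyGet? c 1 with                           -- coordinates[1] (IndexError → none)
      | none => none
      | some c1 =>
        let b3 := PySem.Str.isIn (String.ofList [c1]) "0123456789"   -- coordinates[1] in ok_numbers
        ok_format_loop rest (acc ++ [b1, b2, b3])

def ok_format (xy : List String) : Bool :=
  match ok_format_loop xy [] with
  | none => false                                               -- except IndexError: return False
  | some checks => !(checks.contains false)                     -- False in checks_out → False, else True

-- ===== PORT B =====
-- re.fullmatch(r"[a-jA-J][0-9]", s): exact hand port of the regex — two chars, first in
-- a–j or A–J, second in 0–9 (exact: the pattern has no anchors/newline subtleties)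
def coordMatch (s : String) : Bool :=
  match s.toList with
  | [c1, c2] =>
      ((decide ('a' ≤ c1) && decide (c1 ≤ 'j')) || (decide ('A' ≤ c1) && decide (c1 ≤ 'J')))
        && (decide ('0' ≤ c2) && decide (c2 ≤ '9'))
  | _ => false

def ok_format_alt (xy : List String) : Bool := xy.all coordMatch

-- ===== PRECONDITION & SPEC =====
def Spec_ok_format (xy : List String) (out : Bool) : Prop := out = ok_format_alt xy
instance (xy : List String) (out : Bool) : Decidable (Spec_ok_format xy out) := by unfold Spec_ok_format; infer_instance

-- ===== CLAIM (what is proved, stated in full; the proofs are below) =====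
def Claim_equal_ok_format : Prop := ∀ (xy : List String), Dom_ok_format xy → Spec_ok_format xy (ok_format xy)

-- ===== LEMMAS AND PROOFS =====

theorem pv_singleton_infix {α : Type} {a : α} {l : List α} : [a] <:+: l ↔ a ∈ l := by
  constructor
  · rintro ⟨s, t, rfl⟩; simp
  · intro h
    obtain ⟨s, t, rfl⟩ := List.append_of_mem h
    exact ⟨s, t, by simp⟩

theorem pv_char_le_iff (a b : Char) : (a ≤ b) ↔ a.toNat ≤ b.toNat := Iff.rfl

theorem pv_char_eq_iff (a b : Char) : a = b ↔ a.toNat = b.toNat := by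
  constructor
  · intro h; rw [h]
  · intro h
    apply Char.ext
    apply UInt32.toBitVec_inj.mp
    apply BitVec.toNat_inj.mp
    exact h

theorem pv_lower_mem (c : Char) :
    PySem.Str.isIn (String.ofList (PySem.Chars.lower [c])) "abcdefghij"
      = ((decide ('a' ≤ c) && decide (c ≤ 'j')) || (decide ('A' ≤ c) && decide (c ≤ 'J'))) := by
  rw [Bool.eq_iff_iff, PySem.Str.isIn_iff_infix]
  have hlist : ("abcdefghij" : String).toList
      = ['a','b','c','d','e','f','g','h','i','j'] := by simp
  have htl : (String.ofList (PySem.Chars.lower [c])).toList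
      = [PySem.Chars.lowerChar c] := by simp [PySem.Chars.lower]
  rw [htl, hlist, pv_singleton_infix]
  simp only [PySem.Chars.lowerChar, PySem.Chars.isupper, List.mem_cons, List.not_mem_nil,
    or_false, Bool.or_eq_true, Bool.and_eq_true, decide_eq_true_eq]
  have ha : ('a' : Char).toNat = 97 := rfl
  have hb : ('b' : Char).toNat = 98 := rfl
  have hc' : ('c' : Char).toNat = 99 := rfl
  have hd : ('d' : Char).toNat = 100 := rfl
  have he : ('e' : Char).toNat = 101 := rfl
  have hf : ('f' : Char).toNat = 102 := rfl
  have hg : ('g' : Char).toNat = 103 := rfl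
  have hh : ('h' : Char).toNat = 104 := rfl
  have hi : ('i' : Char).toNat = 105 := rfl
  have hj : ('j' : Char).toNat = 106 := rfl
  have hA : ('A' : Char).toNat = 65 := rfl
  have hJ : ('J' : Char).toNat = 74 := rfl
  by_cases hu : ('A' ≤ c) ∧ (c ≤ 'Z')
  · have hZ : ('Z' : Char).toNat = 90 := rfl
    have hub : c.toNat ≤ 90 := by have h := (pv_char_le_iff c 'Z').mp hu.2; rwa [hZ] at h
    have hlb : 65 ≤ c.toNat := by have h := (pv_char_le_iff 'A' c).mp hu.1; rwa [hA] at h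
    rw [if_pos hu]
    have hv : (Char.ofNat (c.toNat + 32)).toNat = c.toNat + 32 := by
      rw [Char.toNat_ofNat, if_pos (Or.inl (by omega))]
    simp only [pv_char_eq_iff, pv_char_le_iff, hv, ha, hb, hc', hd, he, hf, hg, hh, hi, hj, hA, hJ]
    omega
  · rw [if_neg hu]
    have hnu : ¬ (65 ≤ c.toNat ∧ c.toNat ≤ 90) := by
      intro h
      have hZ : ('Z' : Char).toNat = 90 := rfl
      exact hu ⟨(pv_char_le_iff 'A' c).mpr (by rw [hA]; omega), (pv_char_le_iff c 'Z').mpr (by rw [hZ]; omega)⟩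
    simp only [pv_char_eq_iff, pv_char_le_iff, ha, hb, hc', hd, he, hf, hg, hh, hi, hj, hA, hJ]
    omega

theorem pv_digit_mem (c : Char) :
    PySem.Str.isIn (String.ofList [c]) "0123456789"
      = (decide ('0' ≤ c) && decide (c ≤ '9')) := by
  rw [Bool.eq_iff_iff, PySem.Str.isIn_iff_infix]
  have hlist : ("0123456789" : String).toList
      = ['0','1','2','3','4','5','6','7','8','9'] := by simp
  have htl : (String.ofList [c]).toList = [c] := by simp
  rw [htl, hlist, pv_singleton_infix]
  simp only [List.mem_cons, List.not_mem_nil, or_false, Bool.and_eq_true, decide_eq_true_eq]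
  have h0 : ('0' : Char).toNat = 48 := rfl
  have h1 : ('1' : Char).toNat = 49 := rfl
  have h2 : ('2' : Char).toNat = 50 := rfl
  have h3 : ('3' : Char).toNat = 51 := rfl
  have h4 : ('4' : Char).toNat = 52 := rfl
  have h5 : ('5' : Char).toNat = 53 := rfl
  have h6 : ('6' : Char).toNat = 54 := rfl
  have h7 : ('7' : Char).toNat = 55 := rfl
  have h8 : ('8' : Char).toNat = 56 := rfl
  have h9 : ('9' : Char).toNat = 57 := rfl
  simp only [pv_char_eq_iff, pv_char_le_iff, h0, h1, h2, h3, h4, h5, h6, h7, h8, h9]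
  omega

theorem pv_loop_eq (xy : List String) : ∀ acc : List Bool,
    (match ok_format_loop xy acc with
      | none => false
      | some l => !(l.contains false))
      = (!(acc.contains false) && xy.all coordMatch) := by
  induction xy with
  | nil => intro acc; simp [ok_format_loop]
  | cons s rest ih =>
    intro acc
    rcases hts : s.toList with _ | ⟨c0, tl⟩
    · simp [ok_format_loop, PySem.Str.pyGet?, PySem.Chars.pyGet?, PySem.List.pyGet?, hts,
        coordMatch]
    · rcases tl with _ | ⟨c1, tl'⟩
      · simp [ok_format_loop, PySem.Str.pyGet?, PySem.Chars.pyGet?, PySem.List.pyGet?,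
          PySem.List.pyIdx?, hts, coordMatch]
      · have hlen : PySem.Str.len s = (tl'.length : Int) + 2 := by
          simp [PySem.Str.len, hts]; ring_nf
        have h0 : PySem.Str.pyGet? s 0 = some c0 := by
          simp [PySem.Str.pyGet?, PySem.Chars.pyGet?, hts]
        have h1 : PySem.Str.pyGet? s 1 = some c1 := by
          have : (1 : Int) = ((1 : Nat) : Int) := rfl
          rw [PySem.Str.pyGet?, PySem.Chars.pyGet?, this, PySem.List.pyGet?_natCast, hts]
          rfl
        simp only [ok_format_loop, h0, h1, hlen]
        rw [ih]
        have hcm : coordMatch s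
            = (decide (tl' = []) &&
               (((decide ('a' ≤ c0) && decide (c0 ≤ 'j')) || (decide ('A' ≤ c0) && decide (c0 ≤ 'J')))
                 && (decide ('0' ≤ c1) && decide (c1 ≤ '9')))) := by
          rcases tl' with _ | _
          · simp [coordMatch, hts]
          · simp [coordMatch, hts]
        simp only [List.all_cons]
        rw [hcm, pv_lower_mem, pv_digit_mem]
        have hb1 : decide ((tl'.length : Int) + 2 = 2) = decide (tl' = []) := by
          rcases tl' with _ | ⟨x, xs⟩
          · simp
          · simp only [List.length_cons, decide_eq_decide]
            constructor
            · intro h; exfalso; omega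
            · intro h; exact absurd h (by simp)
        rw [hb1, List.contains_append]
        generalize decide (tl' = []) = p
        generalize (decide ('a' ≤ c0) && decide (c0 ≤ 'j') || decide ('A' ≤ c0) && decide (c0 ≤ 'J')) = q
        generalize (decide ('0' ≤ c1) && decide (c1 ≤ '9')) = r
        generalize rest.all coordMatch = t
        generalize acc.contains false = u
        cases p <;> cases q <;> cases r <;> cases t <;> cases u <;> rfl

-- ===== VERDICT (by name: the statement is the Claim_ definition above) =====
theorem ok_format_spec : Claim_equal_ok_format := by
  intro xy _
  unfold Spec_ok_format ok_format ok_format_alt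
  rw [pv_loop_eq xy []]
  simp
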